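-- pv_equiv track=rewrite | github.com/ayushkarn14/Programs | Python/palinstair.py | solve
-- ===== SOURCE A (Python) =====
-- def solve(n):
--     ar = []
--     st = ""
--     for i in range(1, n + 1):
--         st = ""
--         for j in range(1, i + 1):
--             st += str(j)
--         for j in reversed(range(1, i)):
--             st += str(j)
--         ar.append(st)
--     return ar
-- ===== SOURCE B (Python) =====
-- def solve(n):
--     ar = []
--     nums = []
--     for i in range(1, n + 1):
--         nums.append(str(i))
--         ar.append(''.join(nums) + ''.join(nums[:-1][::-1]))
--     return ar
-- ===== Notes on version B (the rewrite author's own statement) =====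
-- stated objective: simpler
-- what changed: Replaced both inner digit-building loops by a persistent token-list accumulator: each palindrome is produced in one shot as ''.join(nums) + ''.join(nums[:-1][::-1]), where nums collects str(1)..str(i) across iterations.
import Mathlib
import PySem

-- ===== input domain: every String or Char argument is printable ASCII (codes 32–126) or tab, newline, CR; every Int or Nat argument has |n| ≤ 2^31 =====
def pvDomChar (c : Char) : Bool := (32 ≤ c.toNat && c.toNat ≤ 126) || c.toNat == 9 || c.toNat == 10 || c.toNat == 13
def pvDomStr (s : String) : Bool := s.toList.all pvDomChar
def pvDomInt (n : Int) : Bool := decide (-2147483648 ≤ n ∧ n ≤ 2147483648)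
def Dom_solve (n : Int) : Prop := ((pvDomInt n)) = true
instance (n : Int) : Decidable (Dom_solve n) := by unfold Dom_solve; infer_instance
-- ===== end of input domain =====

-- B rebuilds each palindrome from a persistent token list instead of A's two inner digit loops (objective: simpler).

-- ===== PORT A =====
def solve (n : Int) : List String :=
  (PySem.List.pyRange 1 (n + 1)).foldl (fun ar i =>
    -- st = ""; for j in range(1, i+1): st += str(j)
    let st : List Char :=
      (PySem.List.pyRange 1 (i + 1)).foldl (fun st j => st ++ PySem.Int.toChars j) []
    -- for j in reversed(range(1, i)): st += str(j)
    let st :=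
      (PySem.List.pyRange 1 i).reverse.foldl (fun st j => st ++ PySem.Int.toChars j) st
    ar ++ [String.ofList st]) []

-- ===== PORT B =====
-- one loop iteration of Source B: append str(i) to nums, then the palindrome is
-- ''.join(nums) + ''.join(nums[:-1][::-1])   (slice? is `some` here: its step is -1 ≠ 0)
def solveAltStep (s : List String × List (List Char)) (i : Int) : List String × List (List Char) :=
  let nums := s.2 ++ [PySem.Int.toChars i]
  let rev := (PySem.List.slice? (PySem.List.slice nums none (some (-1))) none none (-1)).getD []
  (s.1 ++ [String.ofList (PySem.Chars.join [] nums ++ PySem.Chars.join [] rev)], nums)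

def solve_alt (n : Int) : List String :=
  ((PySem.List.pyRange 1 (n + 1)).foldl solveAltStep ([], [])).1

-- ===== PRECONDITION & SPEC =====
def Spec_solve (n : Int) (out : List String) : Prop := out = solve_alt n
instance (n : Int) (out : List String) : Decidable (Spec_solve n out) := by unfold Spec_solve; infer_instance

-- ===== CLAIM (what is proved, stated in full; the proofs are below) =====
def Claim_equal_solve : Prop := ∀ (n : Int), Dom_solve n → Spec_solve n (solve n)

-- ===== LEMMAS AND PROOFS =====

-- the palindrome string both versions produce for index i
def palin (i : Int) : String :=
  String.ofList ((PySem.List.pyRange 1 (i + 1)).flatMap PySem.Int.toChars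
    ++ (PySem.List.pyRange 1 i).reverse.flatMap PySem.Int.toChars)

lemma join_nil_flatten (ps : List (List Char)) : PySem.Chars.join [] ps = ps.flatten := by
  induction ps with
  | nil => rfl
  | cons p ps ih =>
    cases ps with
    | nil => simp [PySem.Chars.join, List.intercalate]
    | cons q qs =>
      simpa [PySem.Chars.join, List.intercalate] using ih

lemma solve_closed (n : Int) :
    solve n = (PySem.List.pyRange 1 (n + 1)).map palin := by
  unfold solve
  rw [show (fun (ar : List String) (i : Int) =>
        ar ++ [String.ofList ((PySem.List.pyRange 1 i).reverse.foldl
          (fun st j => st ++ PySem.Int.toChars j)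
          ((PySem.List.pyRange 1 (i + 1)).foldl (fun st j => st ++ PySem.Int.toChars j) []))])
      = fun ar i => ar ++ [palin i] from ?_,
      PySem.List.foldl_append_singleton_eq_map]
  · simp
  · funext ar i
    rw [PySem.List.foldl_append_eq_flatMap, PySem.List.foldl_append_eq_flatMap]
    simp [palin]

lemma pyRange_one_snoc (i : Int) (hi : 1 ≤ i) :
    PySem.List.pyRange 1 (i + 1) = PySem.List.pyRange 1 i ++ [i] := by
  rw [PySem.List.pyRange_one_append 1 i (i + 1) hi (by omega),
      PySem.List.pyRange_one_cons (show i < i + 1 by omega)]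
  simp [PySem.List.pyRange]

lemma step_eq (i : Int) (hi : 1 ≤ i) (ar : List String) :
    solveAltStep (ar, (PySem.List.pyRange 1 i).map PySem.Int.toChars) i
      = (ar ++ [palin i], (PySem.List.pyRange 1 (i + 1)).map PySem.Int.toChars) := by
  unfold solveAltStep
  simp only [PySem.List.slice_to_neg_one, PySem.List.slice?_none_none_neg_one,
    Option.getD_some, pyRange_one_snoc i hi]
  simp [palin, join_nil_flatten, List.flatMap_def, pyRange_one_snoc i hi]

lemma loop_eq (k : Nat) (a b : Int) (ha : 1 ≤ a) (hk : b - a ≤ (k : Int)) (ar : List String) :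
    (PySem.List.pyRange a b).foldl solveAltStep
        (ar, (PySem.List.pyRange 1 a).map PySem.Int.toChars)
      = (ar ++ (PySem.List.pyRange a b).map palin,
         (PySem.List.pyRange 1 (max a b)).map PySem.Int.toChars) := by
  induction k generalizing a ar with
  | zero =>
    have hba : b ≤ a := by omega
    rw [show PySem.List.pyRange a b = [] by
      simp [PySem.List.pyRange]; omega]
    simp [show max a b = a by omega]
  | succ k ih =>
    by_cases hab : a < b
    · rw [PySem.List.pyRange_one_cons hab]
      simp only [List.foldl_cons]
      rw [step_eq a ha ar, ih (a + 1) (by omega) (by omega)]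
      rw [show max (a + 1) b = b by omega, show max a b = b by omega]
      simp
    · rw [show PySem.List.pyRange a b = [] by
        simp [PySem.List.pyRange]; omega]
      simp [show max a b = a by omega]

-- ===== VERDICT (by name: the statement is the Claim_ definition above) =====
theorem solve_spec : Claim_equal_solve := by
  intro n _
  unfold Spec_solve solve_alt
  rw [solve_closed]
  rw [show ([] : List (List Char)) = (PySem.List.pyRange 1 1).map PySem.Int.toChars by
    simp [PySem.List.pyRange]]
  rw [loop_eq (n + 1 - 1).toNat 1 (n + 1) le_rfl (by omega)]
  simp
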